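-- pv_equiv track=rewrite | github.com/Blockmaster2706/smug-bot | custom_modules/commandhelp.py | command_help
-- ===== SOURCE A (Python) =====
-- def command_help(command="help"):
--     isLanguageGerman = False
--
--     if isLanguageGerman:
--         match (command):
--             case "help-slash":
--                 return "Dieser Befehl. Zeigt Hilfe für den angegebenen Befehl.\nSyntax: /help befehl:(BEFEHL)\n\nNutze '/help commands' um eine Liste aller Befehle zu erhalten."
--             case "help":
--                 return "Dieser Befehl. Zeigt Hilfe für den angegebenen Befehl.\nSyntax: %help (BEFEHL)\n\nNutze 'help commands' um eine Liste aller Befehle zu erhalten."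
--             case "setlogs":
--                 return 'Setzt den Channel in dem Befehle gelogt werden. Entfernt den LogChannel falls die Aktion "Entfernen" ist. Channel als ID angeben. Admin only.'
--             case "database":
--                 return "Der Befehl um direkt mit der Datenbank zu interagieren. Nur für den Entwickler."
--             case "reminder":
--                 return "Nutze diesen Befehl um den Bot dich an etwas erinnern zu lassen. Syntax: /reminder erinnerung: (NACHRICHT) stunden: x(optional) minuten: x(optional) sekunden: x(optional)"
--             case "commandtoggle":
--                 return "Schaltet Befehle ein oder aus. Nur für den Entwickler."
--             case "soe":
--                 return "Nur ein kleiner Test Befehl"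
--             case "farbrolle":
--                 return "Gibt dem Nutzer eine Farbrolle oder bearbeitet sie. Die Farbe kann mit oder ohne # genannt werden und ist als Hex Code einzugeben. Der Standard ist Weiß. \nSyntax: %farbrolle (FARBE)"
--             case "commands":
--
--                 returnText = "Hier ist eine Liste aller Befehle:\n"
--                 for command in commands:
--                     returnText += "{}\n".format(command)
--                 return returnText
--
--             case _:
--                 return "Unbekannter Befehl"
--     else:
--         match (command):
--             case "help-slash":
--                 return "This Command. Shows help for the given command.\nSyntax: /help command:(COMMAND)\n\nUse '/help commands' to get a list of all Commands."
--             case "help":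
--                 return "This Command. Shows help for the given command.\nSyntax: %help (COMMAND)\n\nUse 'help commands' to get a list of all Commands."
--             case "setlogs":
--                 return 'Sets the channel in which Commands are logged. Removes the Logchannel if the action is "Remove". Supply the Channel as an ID. Admin only.'
--             case "database":
--                 return "The command to directy interact with the database. Only for the Developer."
--             case "reminder":
--                 return "Use this command to let yourself be reminded of something. Syntax: /reminder reminder: (MESSAGe) hours: x(optional) minutes: x(optional) seconds: x(optional)"
--             case "commandtoggle":
--                 return "Turns commands on or off. Only for the Developer."
--             case "test":
--                 return "Just a little test command."
--             case "colorrole":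
--                 return "Gives the user a color role or edits it. The color can be supplied with or without the # and is to be supplied as a Hex Code. The default is white. \nSyntax: %colorrole (color)"
--             case "commands":
--
--                 returnText = "Here's a list of all commands:\n"
--                 for command in commands:
--                     returnText += "{}\n".format(command)
--                 return returnText
--
--             case _:
--                 return "Unknown Command."
--
-- commands = ( "help-slash", "help", "setlogs", "database", "commandtoggle")
-- ===== SOURCE B (Python) =====
-- commands = ( "help-slash", "help", "setlogs", "database", "commandtoggle")
--
-- _commands_text = "Here's a list of all commands:\n"
-- for _c in commands:
--     _commands_text += "{}\n".format(_c)
--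
-- # parallel arrays in ascending key order; the answer is found by binary search
-- _KEYS = [
--     "colorrole",
--     "commands",
--     "commandtoggle",
--     "database",
--     "help",
--     "help-slash",
--     "reminder",
--     "setlogs",
--     "test",
-- ]
-- _TEXTS = [
--     "Gives the user a color role or edits it. The color can be supplied with or without the # and is to be supplied as a Hex Code. The default is white. \nSyntax: %colorrole (color)",
--     _commands_text,
--     "Turns commands on or off. Only for the Developer.",
--     "The command to directy interact with the database. Only for the Developer.",
--     "This Command. Shows help for the given command.\nSyntax: %help (COMMAND)\n\nUse 'help commands' to get a list of all Commands.",
--     "This Command. Shows help for the given command.\nSyntax: /help command:(COMMAND)\n\nUse '/help commands' to get a list of all Commands.",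
--     "Use this command to let yourself be reminded of something. Syntax: /reminder reminder: (MESSAGe) hours: x(optional) minutes: x(optional) seconds: x(optional)",
--     'Sets the channel in which Commands are logged. Removes the Logchannel if the action is "Remove". Supply the Channel as an ID. Admin only.',
--     "Just a little test command.",
-- ]
--
-- def command_help(command="help"):
--     lo, hi = 0, len(_KEYS)
--     while lo < hi:
--         mid = (lo + hi) // 2
--         if _KEYS[mid] < command:
--             lo = mid + 1
--         else:
--             hi = mid
--     if lo < len(_KEYS) and _KEYS[lo] == command:
--         return _TEXTS[lo]
--     return "Unknown Command."
-- ===== Notes on version B (the rewrite author's own statement) =====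
-- stated objective: alternative
-- what changed: Replaces the dead German branch and the nine-way sequential match with a hand-written binary search over two parallel arrays sorted by key (the dynamic 'commands' listing is built once at module load and stored in the table like any other entry), returning the matched text or the default.
import Mathlib
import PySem

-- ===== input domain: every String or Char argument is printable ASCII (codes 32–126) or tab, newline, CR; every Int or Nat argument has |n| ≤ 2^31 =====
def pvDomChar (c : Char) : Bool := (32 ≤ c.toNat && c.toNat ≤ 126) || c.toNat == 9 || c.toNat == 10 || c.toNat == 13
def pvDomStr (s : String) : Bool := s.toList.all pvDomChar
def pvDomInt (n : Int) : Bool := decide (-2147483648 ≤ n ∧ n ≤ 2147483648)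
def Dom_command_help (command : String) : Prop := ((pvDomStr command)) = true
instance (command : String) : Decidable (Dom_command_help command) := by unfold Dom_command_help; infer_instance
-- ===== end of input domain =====

-- B replaces A's dead German branch and nine-way sequential match with a binary search
-- over parallel key/text arrays sorted by key (objective: alternative algorithm).

-- the module-level 'commands' tuple
def commandsTuple : List String := ["help-slash", "help", "setlogs", "database", "commandtoggle"]

-- ===== PORT A =====
def command_help (command : String) : String :=
  let isLanguageGerman := false
  if isLanguageGerman then
    -- German match (dead code in A, transliterated)
    if command == "help-slash" then "Dieser Befehl. Zeigt Hilfe für den angegebenen Befehl.\nSyntax: /help befehl:(BEFEHL)\n\nNutze '/help commands' um eine Liste aller Befehle zu erhalten."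
    else if command == "help" then "Dieser Befehl. Zeigt Hilfe für den angegebenen Befehl.\nSyntax: %help (BEFEHL)\n\nNutze 'help commands' um eine Liste aller Befehle zu erhalten."
    else if command == "setlogs" then "Setzt den Channel in dem Befehle gelogt werden. Entfernt den LogChannel falls die Aktion \"Entfernen\" ist. Channel als ID angeben. Admin only."
    else if command == "database" then "Der Befehl um direkt mit der Datenbank zu interagieren. Nur für den Entwickler."
    else if command == "reminder" then "Nutze diesen Befehl um den Bot dich an etwas erinnern zu lassen. Syntax: /reminder erinnerung: (NACHRICHT) stunden: x(optional) minuten: x(optional) sekunden: x(optional)"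
    else if command == "commandtoggle" then "Schaltet Befehle ein oder aus. Nur für den Entwickler."
    else if command == "soe" then "Nur ein kleiner Test Befehl"
    else if command == "farbrolle" then "Gibt dem Nutzer eine Farbrolle oder bearbeitet sie. Die Farbe kann mit oder ohne # genannt werden und ist als Hex Code einzugeben. Der Standard ist Weiß. \nSyntax: %farbrolle (FARBE)"
    else if command == "commands" then
      commandsTuple.foldl (fun acc c => acc ++ c ++ "\n") "Hier ist eine Liste aller Befehle:\n"
    else "Unbekannter Befehl"
  else
    if command == "help-slash" then "This Command. Shows help for the given command.\nSyntax: /help command:(COMMAND)\n\nUse '/help commands' to get a list of all Commands."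
    else if command == "help" then "This Command. Shows help for the given command.\nSyntax: %help (COMMAND)\n\nUse 'help commands' to get a list of all Commands."
    else if command == "setlogs" then "Sets the channel in which Commands are logged. Removes the Logchannel if the action is \"Remove\". Supply the Channel as an ID. Admin only."
    else if command == "database" then "The command to directy interact with the database. Only for the Developer."
    else if command == "reminder" then "Use this command to let yourself be reminded of something. Syntax: /reminder reminder: (MESSAGe) hours: x(optional) minutes: x(optional) seconds: x(optional)"
    else if command == "commandtoggle" then "Turns commands on or off. Only for the Developer."
    else if command == "test" then "Just a little test command."
    else if command == "colorrole" then "Gives the user a color role or edits it. The color can be supplied with or without the # and is to be supplied as a Hex Code. The default is white. \nSyntax: %colorrole (color)"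
    else if command == "commands" then
      commandsTuple.foldl (fun acc c => acc ++ c ++ "\n") "Here's a list of all commands:\n"
    else "Unknown Command."

-- ===== PORT B =====
-- module-level: the 'commands' listing is built once, by Source B's loop
def commandsText : String :=
  commandsTuple.foldl (fun acc c => acc ++ c ++ "\n") "Here's a list of all commands:\n"

-- parallel arrays in ascending key order (as written in Source B)
def sortedKeys : List String :=
  ["colorrole", "commands", "commandtoggle", "database", "help",
   "help-slash", "reminder", "setlogs", "test"]

def sortedTexts : List String :=
  [ "Gives the user a color role or edits it. The color can be supplied with or without the # and is to be supplied as a Hex Code. The default is white. \nSyntax: %colorrole (color)",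
    commandsText,
    "Turns commands on or off. Only for the Developer.",
    "The command to directy interact with the database. Only for the Developer.",
    "This Command. Shows help for the given command.\nSyntax: %help (COMMAND)\n\nUse 'help commands' to get a list of all Commands.",
    "This Command. Shows help for the given command.\nSyntax: /help command:(COMMAND)\n\nUse '/help commands' to get a list of all Commands.",
    "Use this command to let yourself be reminded of something. Syntax: /reminder reminder: (MESSAGe) hours: x(optional) minutes: x(optional) seconds: x(optional)",
    "Sets the channel in which Commands are logged. Removes the Logchannel if the action is \"Remove\". Supply the Channel as an ID. Admin only.",
    "Just a little test command." ]

-- Source B's hand-written 'while lo < hi' binary search; fuel = number of remaining iterations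
-- (hi - lo bounds it) makes the loop a structural recursion — exact on every input
def bisGo (keys : List String) (x : String) : Nat → Nat → Nat → Nat
  | 0, lo, _ => lo
  | fuel + 1, lo, hi =>
    if lo < hi then
      let mid := (lo + hi) / 2
      if keys.getD mid "" < x then bisGo keys x fuel (mid + 1) hi
      else bisGo keys x fuel lo mid
    else lo

def command_help_alt (command : String) : String :=
  let lo := bisGo sortedKeys command sortedKeys.length 0 sortedKeys.length
  if lo < sortedKeys.length && sortedKeys.getD lo "" == command then sortedTexts.getD lo ""
  else "Unknown Command."

-- ===== PRECONDITION & SPEC =====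
def Spec_command_help (command : String) (out : String) : Prop := out = command_help_alt command
instance (command : String) (out : String) : Decidable (Spec_command_help command out) := by unfold Spec_command_help; infer_instance

-- ===== CLAIM =====
def Claim_equal_command_help : Prop :=
  ∀ (command : String), Dom_command_help command → Spec_command_help command (command_help command)

-- ===== LEMMAS AND PROOFS =====

-- if the command is none of the nine keys, B returns the default
theorem alt_default (command : String) (hne : command ∉ sortedKeys) :
    command_help_alt command = "Unknown Command." := by
  show (if bisGo sortedKeys command sortedKeys.length 0 sortedKeys.length < sortedKeys.length &&
          sortedKeys.getD (bisGo sortedKeys command sortedKeys.length 0 sortedKeys.length) "" == command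
        then sortedTexts.getD (bisGo sortedKeys command sortedKeys.length 0 sortedKeys.length) ""
        else "Unknown Command.") = "Unknown Command."
  set l := bisGo sortedKeys command sortedKeys.length 0 sortedKeys.length with hl
  by_cases h9 : l < sortedKeys.length
  · have hmem : sortedKeys.getD l "" ∈ sortedKeys := by
      rw [List.getD_eq_getElem sortedKeys "" h9]
      exact List.getElem_mem h9
    have hbeq : (sortedKeys.getD l "" == command) = false :=
      beq_eq_false_iff_ne.mpr (fun h => hne (h ▸ hmem))
    simp only [hbeq, Bool.and_false, Bool.false_eq_true, if_false]
  · have hdec : decide (l < sortedKeys.length) = false := by simp [h9]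
    simp only [hdec, Bool.false_and, Bool.false_eq_true, if_false]

-- ===== VERDICT =====
set_option maxRecDepth 10000 in
theorem command_help_spec : Claim_equal_command_help := by
  intro command _
  unfold Spec_command_help
  by_cases h1 : command = "colorrole"
  · subst h1
    simp [command_help, command_help_alt, bisGo, sortedKeys, sortedTexts]; decide
  by_cases h2 : command = "commands"
  · subst h2
    simp [command_help, command_help_alt, bisGo, sortedKeys, sortedTexts, commandsText, commandsTuple]; decide
  by_cases h3 : command = "commandtoggle"
  · subst h3
    simp [command_help, command_help_alt, bisGo, sortedKeys, sortedTexts]; decide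
  by_cases h4 : command = "database"
  · subst h4
    simp [command_help, command_help_alt, bisGo, sortedKeys, sortedTexts]; decide
  by_cases h5 : command = "help"
  · subst h5
    simp [command_help, command_help_alt, bisGo, sortedKeys, sortedTexts]; decide
  by_cases h6 : command = "help-slash"
  · subst h6
    simp [command_help, command_help_alt, bisGo, sortedKeys, sortedTexts]; decide
  by_cases h7 : command = "reminder"
  · subst h7
    simp [command_help, command_help_alt, bisGo, sortedKeys, sortedTexts]; decide
  by_cases h8 : command = "setlogs"
  · subst h8
    simp [command_help, command_help_alt, bisGo, sortedKeys, sortedTexts]; decide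
  by_cases h9 : command = "test"
  · subst h9
    simp [command_help, command_help_alt, bisGo, sortedKeys, sortedTexts]; decide
  have hmem : command ∉ sortedKeys := by
    simp [sortedKeys, h1, h2, h3, h4, h5, h6, h7, h8, h9]
  rw [alt_default command hmem]
  simp [command_help, h1, h2, h3, h4, h5, h6, h7, h8, h9]
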